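-- pv_equiv track=rewrite | github.com/Nithin8919/competing_prompts_agent | backend/robust_analyzer.py | _calc_conflict_level
-- ===== SOURCE A (Python) =====
-- from typing import Dict, Any, List, Optional
--
-- def _calc_conflict_level(conflicts: List[Dict]) -> str:
--     """Calculate overall conflict level"""
--     if not conflicts:
--         return "low"
--
--     max_severity = max((c.get("severity_score", 1) for c in conflicts), default=1)
--     conflict_count = len(conflicts)
--
--     if max_severity >= 8 or conflict_count >= 5:
--         return "critical"
--     elif max_severity >= 6 or conflict_count >= 3:
--         return "high"
--     elif max_severity >= 4 or conflict_count >= 2: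
--         return "medium"
--     else:
--         return "low"
-- ===== SOURCE B (Python) =====
-- LEVELS = ("low", "medium", "high", "critical")
--
-- def _calc_conflict_level(conflicts):
--     """Calculate overall conflict level"""
--     level = 0
--     count = 0
--     for c in conflicts:
--         count += 1
--         s = c.get("severity_score", 1)
--         if s >= 8 or count >= 5:
--             return "critical"
--         level = max(level,
--                     2 if s >= 6 else 1 if s >= 4 else 0,
--                     2 if count >= 3 else 1 if count >= 2 else 0)
--     return LEVELS[level]
-- ===== Notes on version B (the rewrite author's own statement) =====
-- stated objective: alternative
-- what changed: Instead of computing max severity and len() and then running a four-way if/elif cascade, B makes a single early-exiting pass that increments a running count, returns 'critical' immediately when a severity>=8 or fifth element is seen, and otherwise upgrades a running level (0-2) per element via max, indexing a level table at the end.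
import Mathlib
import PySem

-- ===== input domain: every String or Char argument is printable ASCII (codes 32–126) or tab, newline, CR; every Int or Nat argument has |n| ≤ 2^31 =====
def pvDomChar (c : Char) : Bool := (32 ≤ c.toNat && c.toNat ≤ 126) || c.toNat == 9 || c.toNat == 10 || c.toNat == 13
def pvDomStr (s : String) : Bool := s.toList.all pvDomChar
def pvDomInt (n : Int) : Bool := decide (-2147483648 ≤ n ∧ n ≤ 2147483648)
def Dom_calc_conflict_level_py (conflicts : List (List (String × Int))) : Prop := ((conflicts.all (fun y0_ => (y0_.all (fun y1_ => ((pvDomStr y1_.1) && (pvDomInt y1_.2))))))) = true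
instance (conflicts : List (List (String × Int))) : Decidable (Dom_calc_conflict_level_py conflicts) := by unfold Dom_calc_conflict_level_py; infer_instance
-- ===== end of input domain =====

-- B replaces A's max()+len()+four-way cascade by a single early-exiting pass that
-- upgrades a running level per element (objective: alternative decomposition).

-- ===== PORT A =====
def calc_conflict_level_py (conflicts : List (List (String × Int))) : String :=
  if conflicts = [] then "low"
  else
    let vals := conflicts.map (fun c => PySem.Dict.getD (PySem.Dict.mk c) "severity_score" 1)
    let max_severity := (PySem.List.max? vals (fun x => x)).getD 1
    let conflict_count : Int := conflicts.length
    if max_severity ≥ 8 ∨ conflict_count ≥ 5 then "critical"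
    else if max_severity ≥ 6 ∨ conflict_count ≥ 3 then "high"
    else if max_severity ≥ 4 ∨ conflict_count ≥ 2 then "medium"
    else "low"

-- ===== PORT B =====
-- the for-loop of Source B: running (count, level) state, early return on "critical"
def pvAltLoop : List (List (String × Int)) → Int → Int → String
  | [], _, level => (["low", "medium", "high", "critical"] : List String).getD level.toNat "low"
  | c :: rest, count, level =>
    let cnt := count + 1
    let s := PySem.Dict.getD (PySem.Dict.mk c) "severity_score" 1
    if s ≥ 8 ∨ cnt ≥ 5 then "critical"
    else pvAltLoop rest cnt
      (max level (max (if s ≥ 6 then (2 : Int) else if s ≥ 4 then 1 else 0)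
                      (if cnt ≥ 3 then (2 : Int) else if cnt ≥ 2 then 1 else 0)))

def calc_conflict_level_py_alt (conflicts : List (List (String × Int))) : String :=
  pvAltLoop conflicts 0 0

-- ===== PRECONDITION & SPEC =====
def Spec_calc_conflict_level_py (conflicts : List (List (String × Int))) (out : String) : Prop := out = calc_conflict_level_py_alt conflicts
instance (conflicts : List (List (String × Int))) (out : String) : Decidable (Spec_calc_conflict_level_py conflicts out) := by unfold Spec_calc_conflict_level_py; infer_instance

-- ===== CLAIM =====
def Claim_equal_calc_conflict_level_py : Prop := ∀ (conflicts : List (List (String × Int))), Dom_calc_conflict_level_py conflicts → Spec_calc_conflict_level_py conflicts (calc_conflict_level_py conflicts)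

-- ===== LEMMAS AND PROOFS =====

def pvSev (c : List (String × Int)) : Int := PySem.Dict.getD (PySem.Dict.mk c) "severity_score" 1

-- full 0..3 tier of a severity / of a count
def pvTS (s : Int) : Int := if s ≥ 8 then 3 else if s ≥ 6 then 2 else if s ≥ 4 then 1 else 0
def pvTC (n : Int) : Int := if n ≥ 5 then 3 else if n ≥ 3 then 2 else if n ≥ 2 then 1 else 0

-- max of per-element contributions, counting from c
def pvG : List (List (String × Int)) → Int → Int
  | [], _ => 0
  | x :: r, c => max (max (pvTS (pvSev x)) (pvTC (c + 1))) (pvG r (c + 1))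

theorem pvTS_bounds (s : Int) : 0 ≤ pvTS s ∧ pvTS s ≤ 3 := by
  simp only [pvTS]; split_ifs <;> omega

theorem pvTC_bounds (n : Int) : 0 ≤ pvTC n ∧ pvTC n ≤ 3 := by
  simp only [pvTC]; split_ifs <;> omega

theorem pvG_bounds (xs : List (List (String × Int))) (c : Int) : 0 ≤ pvG xs c ∧ pvG xs c ≤ 3 := by
  induction xs generalizing c with
  | nil => simp [pvG]
  | cons x r ih =>
    have h1 := pvTS_bounds (pvSev x)
    have h2 := pvTC_bounds (c + 1)
    have h3 := ih (c + 1)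
    simp only [pvG]; omega

theorem pvTS_mono {a b : Int} (h : a ≤ b) : pvTS a ≤ pvTS b := by
  simp only [pvTS]; split_ifs <;> omega

theorem pvTC_mono {a b : Int} (h : a ≤ b) : pvTC a ≤ pvTC b := by
  simp only [pvTC]; split_ifs <;> omega

theorem pvTS_max (a b : Int) : pvTS (max a b) = max (pvTS a) (pvTS b) := by
  rcases le_total a b with h | h
  · rw [max_eq_right h, max_eq_right (pvTS_mono h)]
  · rw [max_eq_left h, max_eq_left (pvTS_mono h)]

theorem pvFoldlMax (l : List Int) (a b : Int) :
    List.foldl max (max a b) l = max a (List.foldl max b l) := by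
  induction l generalizing a b with
  | nil => rfl
  | cons x l ih => simp only [List.foldl, max_assoc, ih]

-- pvG over a nonempty list = max (tier of max severity) (tier of final count)
theorem pvG_eq (r : List (List (String × Int))) (x : List (String × Int)) (c : Int) :
    pvG (x :: r) c = max (pvTS ((r.map pvSev).foldl max (pvSev x))) (pvTC (c + 1 + r.length)) := by
  induction r generalizing x c with
  | nil =>
    have h1 := pvTS_bounds (pvSev x)
    have h2 := pvTC_bounds (c + 1)
    simp only [pvG, List.map_nil, List.foldl_nil, List.length_nil, Nat.cast_zero, add_zero]
    omega
  | cons y r' ih =>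
    have hmono : pvTC (c + 1) ≤ pvTC (c + 1 + 1 + (r'.length : Int)) := pvTC_mono (by omega)
    simp only [pvG] at *
    rw [ih y (c + 1)]
    simp only [List.map_cons, List.foldl_cons, List.length_cons]
    rw [pvFoldlMax, pvTS_max]
    have h1 := pvTS_bounds (pvSev x)
    have h2 := pvTC_bounds (c + 1)
    push_cast
    have e1 : c + 1 + ((r'.length : Int) + 1) = c + 1 + 1 + (r'.length : Int) := by ring
    rw [e1]
    omega

theorem pvLoop_spec (xs : List (List (String × Int))) (c l : Int) (h0 : 0 ≤ l) (h2 : l ≤ 2) :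
    pvAltLoop xs c l = (["low", "medium", "high", "critical"] : List String).getD (max l (pvG xs c)).toNat "low" := by
  induction xs generalizing c l with
  | nil => simp only [pvAltLoop, pvG]; rw [max_eq_left h0]
  | cons x r ih =>
    have hx : PySem.Dict.getD (PySem.Dict.mk x) "severity_score" 1 = pvSev x := rfl
    simp only [pvAltLoop, pvG, hx]
    by_cases h : pvSev x ≥ 8 ∨ c + 1 ≥ 5
    · rw [if_pos h]
      have hts : pvTS (pvSev x) = 3 ∨ pvTC (c + 1) = 3 := by
        rcases h with h | h
        · left; simp only [pvTS]; rw [if_pos h]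
        · right; simp only [pvTC]; rw [if_pos h]
      have h1 := pvTS_bounds (pvSev x)
      have h3 := pvTC_bounds (c + 1)
      have h4 := pvG_bounds r (c + 1)
      have hidx : max l (max (max (pvTS (pvSev x)) (pvTC (c + 1))) (pvG r (c + 1))) = 3 := by omega
      rw [hidx]; rfl
    · rw [if_neg h]
      push_neg at h
      obtain ⟨hs, hc⟩ := h
      have hts : (if pvSev x ≥ 6 then (2 : Int) else if pvSev x ≥ 4 then 1 else 0) = pvTS (pvSev x) := by
        simp only [pvTS]; split_ifs <;> omega
      have htc : (if c + 1 ≥ 3 then (2 : Int) else if c + 1 ≥ 2 then 1 else 0) = pvTC (c + 1) := by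
        simp only [pvTC]; split_ifs <;> omega
      rw [hts, htc]
      have h1 := pvTS_bounds (pvSev x)
      have h3 := pvTC_bounds (c + 1)
      have hb1 : pvTS (pvSev x) ≤ 2 := by simp only [pvTS]; split_ifs <;> omega
      have hb2 : pvTC (c + 1) ≤ 2 := by simp only [pvTC]; split_ifs <;> omega
      rw [ih (c + 1) _ (by omega) (by omega)]
      congr 2
      omega

-- the four-way cascade equals a table lookup at max of the two full tiers
theorem pvCascade (ms n : Int) :
    (if ms ≥ 8 ∨ n ≥ 5 then "critical"
     else if ms ≥ 6 ∨ n ≥ 3 then "high"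
     else if ms ≥ 4 ∨ n ≥ 2 then "medium"
     else "low")
    = (["low", "medium", "high", "critical"] : List String).getD (max (pvTS ms) (pvTC n)).toNat "low" := by
  simp only [pvTS, pvTC]
  split_ifs <;> first | rfl | omega

-- ===== VERDICT =====
theorem calc_conflict_level_py_spec : Claim_equal_calc_conflict_level_py := by
  intro conflicts _
  unfold Spec_calc_conflict_level_py calc_conflict_level_py calc_conflict_level_py_alt
  match conflicts with
  | [] => rfl
  | x :: r =>
    simp only [if_neg (List.cons_ne_nil x r)]
    rw [pvLoop_spec _ 0 0 le_rfl (by omega)]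
    rw [max_eq_right (pvG_bounds (x :: r) 0).1, pvG_eq r x 0]
    have hmap : (x :: r).map (fun c => PySem.Dict.getD (PySem.Dict.mk c) "severity_score" 1)
        = pvSev x :: r.map pvSev := rfl
    rw [hmap, PySem.List.max?_id_cons, Option.getD_some, pvCascade]
    have hc : (((x :: r).length : Int)) = 0 + 1 + (r.length : Int) := by
      simp [List.length_cons]; ring
    rw [hc]
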